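-- pv_equiv track=rewrite | github.com/getfatday/dotfiles | modules/dotm/src/dotm/catalog.py | suggest_groups
-- ===== SOURCE A (Python) =====
-- PACKAGE_GROUPS = {
--     "python": {"python", "python3", "python@3.12", "python@3.13", "pipx", "pyenv", "ruff", "black", "mypy"},
--     "go": {"go", "golangci-lint", "gopls", "gore", "delve"},
--     "ruby": {"ruby", "rbenv", "ruby-build", "cocoapods", "fastlane"},
--     "java": {"java", "openjdk", "maven", "gradle", "kotlin"},
--     "cloud": {"awscli", "azure-cli", "google-cloud-sdk", "terraform", "pulumi"},
--     "network": {"curl", "wget", "httpie", "nmap", "mtr", "iperf3", "wireshark"},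
--     "media-tools": {"ffmpeg", "imagemagick", "yt-dlp", "exiftool", "gifsicle"},
--     "compression": {"p7zip", "xz", "zstd", "lz4", "pigz"},
--     "text-tools": {"jq", "yq", "fzf", "ripgrep", "fd", "bat", "eza", "sd"},
-- }
--
-- def suggest_groups(unmanaged: list[str]) -> dict[str, list[str]]:
--     """Group unmanaged packages into suggested module names."""
--     grouped: dict[str, list[str]] = {}
--     remaining = set(unmanaged)
--
--     for group_name, members in PACKAGE_GROUPS.items():
--         matched = remaining & members
--         if matched:
--             grouped[group_name] = sorted(matched)
--             remaining -= matched
--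
--     # Everything else goes into "misc" or individual modules
--     if remaining:
--         grouped["misc"] = sorted(remaining)
--
--     return grouped
-- ===== SOURCE B (Python) =====
-- PACKAGE_GROUPS = {
--     "python": {"python", "python3", "python@3.12", "python@3.13", "pipx", "pyenv", "ruff", "black", "mypy"},
--     "go": {"go", "golangci-lint", "gopls", "gore", "delve"},
--     "ruby": {"ruby", "rbenv", "ruby-build", "cocoapods", "fastlane"},
--     "java": {"java", "openjdk", "maven", "gradle", "kotlin"},
--     "cloud": {"awscli", "azure-cli", "google-cloud-sdk", "terraform", "pulumi"},
--     "network": {"curl", "wget", "httpie", "nmap", "mtr", "iperf3", "wireshark"},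
--     "media-tools": {"ffmpeg", "imagemagick", "yt-dlp", "exiftool", "gifsicle"},
--     "compression": {"p7zip", "xz", "zstd", "lz4", "pigz"},
--     "text-tools": {"jq", "yq", "fzf", "ripgrep", "fd", "bat", "eza", "sd"},
-- }
--
-- # Reverse index: package name -> group name (member sets are pairwise disjoint).
-- PACKAGE_INDEX = {m: g for g, ms in PACKAGE_GROUPS.items() for m in ms}
--
--
-- def suggest_groups(unmanaged: list[str]) -> dict[str, list[str]]:
--     """Group unmanaged packages into suggested module names."""
--     buckets: dict[str, list[str]] = {}
--     for pkg in sorted(set(unmanaged)):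
--         buckets.setdefault(PACKAGE_INDEX.get(pkg, "misc"), []).append(pkg)
--     return {g: buckets[g] for g in [*PACKAGE_GROUPS, "misc"] if g in buckets}
-- ===== Notes on version B (the rewrite author's own statement) =====
-- stated objective: idiomatic
-- what changed: Replaces the per-group set-intersection/difference loop with a precomputed package-to-group reverse index, one sort of the distinct packages, and a single per-package bucketing pass, assembling the output from the buckets in group order with 'misc' last.
import Mathlib
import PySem

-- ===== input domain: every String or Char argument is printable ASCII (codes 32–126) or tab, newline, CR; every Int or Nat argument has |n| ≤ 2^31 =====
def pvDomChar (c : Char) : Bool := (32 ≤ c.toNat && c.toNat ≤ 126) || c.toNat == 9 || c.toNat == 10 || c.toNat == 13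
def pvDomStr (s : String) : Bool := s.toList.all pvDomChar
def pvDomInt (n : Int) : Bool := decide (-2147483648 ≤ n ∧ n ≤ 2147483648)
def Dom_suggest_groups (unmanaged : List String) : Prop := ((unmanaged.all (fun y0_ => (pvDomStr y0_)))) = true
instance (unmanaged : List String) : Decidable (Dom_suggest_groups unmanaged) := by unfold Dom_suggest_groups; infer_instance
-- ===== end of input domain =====

-- B replaces A's per-group set-intersection scans by a precomputed package→group reverse
-- index, one sort of the distinct packages, and a single per-package bucketing pass (idiomatic).

-- ===== PORT A =====
-- module constant PACKAGE_GROUPS (dict of sets → assoc list of distinct-element lists)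
def PACKAGE_GROUPS : List (String × List String) :=
  [("python", ["python", "python3", "python@3.12", "python@3.13", "pipx", "pyenv", "ruff", "black", "mypy"]),
   ("go", ["go", "golangci-lint", "gopls", "gore", "delve"]),
   ("ruby", ["ruby", "rbenv", "ruby-build", "cocoapods", "fastlane"]),
   ("java", ["java", "openjdk", "maven", "gradle", "kotlin"]),
   ("cloud", ["awscli", "azure-cli", "google-cloud-sdk", "terraform", "pulumi"]),
   ("network", ["curl", "wget", "httpie", "nmap", "mtr", "iperf3", "wireshark"]),
   ("media-tools", ["ffmpeg", "imagemagick", "yt-dlp", "exiftool", "gifsicle"]),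
   ("compression", ["p7zip", "xz", "zstd", "lz4", "pigz"]),
   ("text-tools", ["jq", "yq", "fzf", "ripgrep", "fd", "bat", "eza", "sd"])]

def suggest_groups (unmanaged : List String) : List (String × List String) :=
  let st := PACKAGE_GROUPS.foldl
    (fun (st : List (String × List String) × List String) g =>
      let matched := PySem.Set.inter st.2 g.2
      if matched = [] then st
      else (st.1 ++ [(g.1, PySem.List.sorted matched (fun x => x))],
            PySem.Set.diff st.2 matched))
    ([], PySem.Set.ofList unmanaged)
  if st.2 = [] then st.1
  else st.1 ++ [("misc", PySem.List.sorted st.2 (fun x => x))]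

-- ===== PORT B =====
-- PACKAGE_INDEX = {m: g for g, ms in PACKAGE_GROUPS.items() for m in ms}
def PACKAGE_INDEX : PySem.Dict String String :=
  PACKAGE_GROUPS.foldl (fun d g => g.2.foldl (fun d m => d.insert m g.1) d) PySem.Dict.empty

def suggest_groups_alt (unmanaged : List String) : List (String × List String) :=
  let buckets := (PySem.List.sorted (PySem.Set.ofList unmanaged) (fun x => x)).foldl
    (fun bk pkg => bk.modify (PACKAGE_INDEX.getD pkg "misc") [] (fun b => b ++ [pkg]))
    PySem.Dict.empty
  (PACKAGE_GROUPS.map (fun g => g.1) ++ ["misc"]).foldl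
    (fun acc g => if buckets.contains g then acc ++ [(g, buckets.getD g [])] else acc) []

-- ===== PRECONDITION & SPEC =====
def Spec_suggest_groups (unmanaged : List String) (out : List (String × List String)) : Prop := out = suggest_groups_alt unmanaged
instance (unmanaged : List String) (out : List (String × List String)) : Decidable (Spec_suggest_groups unmanaged out) := by unfold Spec_suggest_groups; infer_instance

-- ===== CLAIM (what is proved, stated in full; the proofs are below) =====
def Claim_equal_suggest_groups : Prop := ∀ (unmanaged : List String), Dom_suggest_groups unmanaged → Spec_suggest_groups unmanaged (suggest_groups unmanaged)

-- ===== LEMMAS AND PROOFS =====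

-- proof-side abbreviation for B's classifier
def pvClassify (p : String) : String := PACKAGE_INDEX.getD p "misc"

-- pairwise disjointness of the member lists (checked on the literal table)
lemma pvDisj : PACKAGE_GROUPS.Pairwise (fun a b => ∀ x ∈ a.2, x ∉ b.2) := by decide

lemma pvMiscNotName : "misc" ∉ PACKAGE_GROUPS.map (fun g => g.1) := by decide

lemma pvNamesNodup : (PACKAGE_GROUPS.map (fun g => g.1)).Nodup := by decide

lemma pvInsertAll_get? (v : String) (ms : List String) (d : PySem.Dict String String) (p : String) :
    (ms.foldl (fun d m => d.insert m v) d).get? p = if p ∈ ms then some v else d.get? p := by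
  induction ms generalizing d with
  | nil => simp
  | cons m ms ih =>
      simp only [List.foldl_cons, ih, List.mem_cons, PySem.Dict.get?_insert]
      by_cases h1 : p ∈ ms <;> by_cases h2 : p = m <;> simp [h1, h2]

lemma pvBuild_get? (gs : List (String × List String)) (d : PySem.Dict String String) (p : String)
    (h : gs.Pairwise (fun a b => ∀ x ∈ a.2, x ∉ b.2)) :
    (gs.foldl (fun d g => g.2.foldl (fun d m => d.insert m g.1) d) d).get? p
      = match gs.find? (fun g => g.2.contains p) with
        | some g => some g.1
        | none => d.get? p := by
  induction gs generalizing d with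
  | nil => simp
  | cons g gs ih =>
      have hhead := (List.pairwise_cons.mp h).1
      have htail := (List.pairwise_cons.mp h).2
      simp only [List.foldl_cons, ih _ htail]
      by_cases hp : p ∈ g.2
      · have hnone : gs.find? (fun g => decide (p ∈ g.2)) = none := by
          apply List.find?_eq_none.mpr
          intro b hb
          simp only [decide_eq_true_eq]
          exact fun hpb => (hhead b hb p hp) hpb
        rw [List.find?_cons_of_pos (by simpa using hp)]
        simp [pvInsertAll_get?, hp, hnone]
      · rw [List.find?_cons_of_neg (by simpa using hp)]
        simp [pvInsertAll_get?, hp]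

lemma pvClassify_eq (p : String) :
    pvClassify p = match PACKAGE_GROUPS.find? (fun g => g.2.contains p) with
      | some g => g.1
      | none => "misc" := by
  unfold pvClassify PACKAGE_INDEX
  rw [PySem.Dict.getD_eq_get?_getD, pvBuild_get? _ _ _ pvDisj]
  cases h : PACKAGE_GROUPS.find? (fun g => g.2.contains p) <;> simp

lemma pvClassify_mem (g : String × List String) (hg : g ∈ PACKAGE_GROUPS) (p : String) :
    pvClassify p = g.1 ↔ p ∈ g.2 := by
  rw [pvClassify_eq]
  constructor
  · intro hcl
    cases hfind : PACKAGE_GROUPS.find? (fun g => g.2.contains p) with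
    | none =>
        rw [hfind] at hcl
        simp only at hcl
        exact absurd (hcl ▸ List.mem_map_of_mem hg) pvMiscNotName
    | some g' =>
        rw [hfind] at hcl
        simp only at hcl
        have hmem := List.mem_of_find?_eq_some hfind
        have hcont : p ∈ g'.2 := by simpa using List.find?_some hfind
        have : g' = g := List.inj_on_of_nodup_map pvNamesNodup hmem hg hcl
        exact this ▸ hcont
  · intro hp
    cases hfind : PACKAGE_GROUPS.find? (fun g => g.2.contains p) with
    | none =>
        exact absurd hp (by simpa using List.find?_eq_none.mp hfind g hg)
    | some g' =>
        have hmem := List.mem_of_find?_eq_some hfind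
        have hcont : p ∈ g'.2 := by simpa using List.find?_some hfind
        have huniq : g' = g := by
          by_contra hne
          have hR : PACKAGE_GROUPS.Pairwise (fun a b => ¬(p ∈ a.2 ∧ p ∈ b.2)) :=
            pvDisj.imp (fun h hx => h p hx.1 hx.2)
          have hsym : Symmetric (fun (a b : String × List String) => ¬(p ∈ a.2 ∧ p ∈ b.2)) :=
            fun a b h hx => h ⟨hx.2, hx.1⟩
          exact hR.forall hsym hmem hg hne ⟨hcont, hp⟩
        simp [huniq]

lemma pvClassify_misc (p : String) :
    pvClassify p = "misc" ↔ ∀ g ∈ PACKAGE_GROUPS, p ∉ g.2 := by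
  rw [pvClassify_eq]
  cases hfind : PACKAGE_GROUPS.find? (fun g => g.2.contains p) with
  | none =>
      simp only
      constructor
      · intro _ g hg
        simpa using List.find?_eq_none.mp hfind g hg
      · intro _; trivial
  | some g' =>
      have hmem := List.mem_of_find?_eq_some hfind
      have hcont : p ∈ g'.2 := by simpa using List.find?_some hfind
      simp only
      constructor
      · intro hcl
        exact absurd (hcl ▸ List.mem_map_of_mem hmem) pvMiscNotName
      · intro hall
        exact absurd hcont (hall g' hmem)

-- A's loop, characterised by filters over the initial remaining set
lemma pvAloop (gs : List (String × List String)) (acc : List (String × List String)) (s : List String)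
    (h : gs.Pairwise (fun a b => ∀ x ∈ a.2, x ∉ b.2)) :
    gs.foldl
      (fun (st : List (String × List String) × List String) g =>
        let matched := PySem.Set.inter st.2 g.2
        if matched = [] then st
        else (st.1 ++ [(g.1, PySem.List.sorted matched (fun x => x))],
              PySem.Set.diff st.2 matched))
      (acc, s)
    = (acc ++ gs.filterMap (fun g =>
          if s.filter (fun x => g.2.contains x) = [] then none
          else some (g.1, PySem.List.sorted (s.filter (fun x => g.2.contains x)) (fun x => x))),
       s.filter (fun x => !gs.any (fun g => g.2.contains x))) := by
  induction gs generalizing acc s with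
  | nil => simp
  | cons g gs ih =>
      have hhead := (List.pairwise_cons.mp h).1
      have htail := (List.pairwise_cons.mp h).2
      have hinter : PySem.Set.inter s g.2 = s.filter (fun x => g.2.contains x) := rfl
      simp only [List.foldl_cons, hinter]
      by_cases hm : s.filter (fun x => g.2.contains x) = []
      · have hnot : ∀ x ∈ s, g.2.contains x = false := by
          intro x hx
          have := List.filter_eq_nil_iff.mp hm x hx
          simpa using this
        rw [if_pos hm, ih acc s htail]
        simp only [List.filterMap_cons, hm, if_pos, Prod.mk.injEq]
        constructor
        · trivial
        · apply List.filter_congr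
          intro x hx
          simp only [List.any_cons, hnot x hx, Bool.false_or]
      · have hdiff : PySem.Set.diff s (s.filter (fun x => g.2.contains x))
            = s.filter (fun x => !g.2.contains x) := by
          apply List.filter_congr
          intro x hx
          simp [List.mem_filter, hx]
        rw [if_neg hm, hdiff, ih _ _ htail]
        have hswap : ∀ g' ∈ gs, (s.filter (fun x => !g.2.contains x)).filter (fun x => g'.2.contains x)
            = s.filter (fun x => g'.2.contains x) := by
          intro g' hg'
          rw [List.filter_filter]
          apply List.filter_congr
          intro x hx
          cases hcx : g'.2.contains x
          · simp
          · have hxg : x ∉ g.2 := by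
              intro hxg
              exact absurd (by simpa using hcx) (hhead g' hg' x hxg)
            simp [hxg]
        simp only [Prod.mk.injEq]
        constructor
        · have hfm : List.filterMap (fun g' =>
              if List.filter (fun x => g'.2.contains x) (List.filter (fun x => !g.2.contains x) s) = [] then none
              else some (g'.1, PySem.List.sorted (List.filter (fun x => g'.2.contains x) (List.filter (fun x => !g.2.contains x) s)) fun x => x)) gs
              = List.filterMap (fun g' =>
              if List.filter (fun x => g'.2.contains x) s = [] then none
              else some (g'.1, PySem.List.sorted (List.filter (fun x => g'.2.contains x) s) fun x => x)) gs := by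
            apply List.filterMap_congr
            intro g' hg'
            rw [hswap g' hg']
          rw [List.append_assoc, hfm, List.filterMap_cons, if_neg hm]
          rfl
        · rw [List.filter_filter]
          apply List.filter_congr
          intro x hx
          simp [Bool.not_or, Bool.and_comm]

lemma pvBucketsAux (l : List String) (d : PySem.Dict String (List String)) (c : String) :
    (l.foldl (fun bk pkg => bk.modify (PACKAGE_INDEX.getD pkg "misc") [] (fun b => b ++ [pkg])) d).getD c []
      = d.getD c [] ++ l.filter (fun p => pvClassify p == c) := by
  induction l generalizing d with
  | nil => simp
  | cons p l ih =>
      simp only [List.foldl_cons, List.filter_cons, ih]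
      by_cases hc : pvClassify p = c
      · have hc' : PACKAGE_INDEX.getD p "misc" = c := hc
        rw [hc']
        have : (d.modify c [] (fun b => b ++ [p])).getD c [] = d.getD c [] ++ [p] :=
          PySem.Dict.getD_modify_self d c [] (fun b => b ++ [p])
        rw [this]
        simp [hc, List.append_assoc]
      · have hc' : c ≠ PACKAGE_INDEX.getD p "misc" := fun h => hc h.symm
        rw [PySem.Dict.getD_modify_of_ne d [] (fun b => b ++ [p]) hc']
        simp [hc]

lemma pvBuckets_getD (s : List String) (c : String) :
    (s.foldl (fun bk pkg => bk.modify (PACKAGE_INDEX.getD pkg "misc") [] (fun b => b ++ [pkg]))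
        PySem.Dict.empty).getD c []
      = s.filter (fun p => pvClassify p == c) := by
  rw [pvBucketsAux]
  simp

lemma pvBucketsContainsAux (l : List String) (d : PySem.Dict String (List String)) (c : String) :
    (l.foldl (fun bk pkg => bk.modify (PACKAGE_INDEX.getD pkg "misc") [] (fun b => b ++ [pkg])) d).contains c
      = (d.contains c || l.any (fun p => pvClassify p == c)) := by
  induction l generalizing d with
  | nil => simp
  | cons p l ih =>
      simp only [List.foldl_cons, List.any_cons, ih, PySem.Dict.contains_modify]
      have : (c == PACKAGE_INDEX.getD p "misc") = (pvClassify p == c) := by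
        rw [Bool.beq_comm]
        rfl
      rw [this]
      cases pvClassify p == c <;> simp

lemma pvBuckets_contains (s : List String) (c : String) :
    ((s.foldl (fun bk pkg => bk.modify (PACKAGE_INDEX.getD pkg "misc") [] (fun b => b ++ [pkg]))
        PySem.Dict.empty).contains c = true) ↔ ∃ p ∈ s, pvClassify p = c := by
  rw [pvBucketsContainsAux]
  simp

lemma pvOut (q : String → Bool) (r : String → String × List String)
    (f : (String × List String) → Option (String × List String)) :
    ∀ gs : List (String × List String), (∀ g ∈ gs, (if q g.1 then some (r g.1) else none) = f g) →
    ((gs.map (fun g => g.1)).filter q).map r = gs.filterMap f := by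
  intro gs
  induction gs with
  | nil => intro _; simp
  | cons g gs ih =>
      intro h
      have hg := h g (by simp)
      have ihh := ih (fun g' hg' => h g' (by simp [hg']))
      simp only [List.map_cons, List.filter_cons, List.filterMap_cons]
      by_cases hq : q g.1
      · simp only [hq, if_true] at hg ⊢
        rw [← hg]
        simp [ihh]
      · simp only [hq, if_false, Bool.false_eq_true] at hg ⊢
        rw [← hg]
        simpa using ihh

lemma pvSortedFilter (u : List String) (c : String → Bool) :
    PySem.List.sorted ((PySem.Set.ofList u).filter c) (fun x => x)
      = (PySem.List.sorted (PySem.Set.ofList u) (fun x => x)).filter c := by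
  apply PySem.List.sorted_eq_of_perm_of_pairwise_lt
  · exact (PySem.List.sorted_perm (PySem.Set.ofList u) (fun x => x) false).filter c
  · have hnd : (PySem.List.sorted (PySem.Set.ofList u) (fun x => x)).Nodup :=
      ((PySem.List.sorted_perm (PySem.Set.ofList u) (fun x => x) false).nodup_iff).mpr
        (PySem.Set.nodup_ofList u)
    have hle := PySem.List.sorted_pairwise (PySem.Set.ofList u) (fun x => x)
    exact ((hle.and hnd).imp (fun h => lt_of_le_of_ne h.1 h.2)).filter c

-- ===== VERDICT (by name: the statement is the Claim_ definition above) =====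
theorem suggest_groups_spec : Claim_equal_suggest_groups := by
  intro u _
  unfold Spec_suggest_groups
  show suggest_groups u = suggest_groups_alt u
  unfold suggest_groups suggest_groups_alt
  simp only [pvAloop PACKAGE_GROUPS [] (PySem.Set.ofList u) pvDisj,
    PySem.List.foldl_append_if, List.nil_append, List.filter_append, List.map_append]
  have hmem : ∀ p : String,
      p ∈ (PySem.List.sorted (PySem.Set.ofList u) fun x => x) ↔ p ∈ PySem.Set.ofList u :=
    fun p => (PySem.List.sorted_perm (PySem.Set.ofList u) (fun x => x) false).mem_iff
  have hgetD : ∀ g ∈ PACKAGE_GROUPS,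
      (List.foldl (fun bk pkg => bk.modify (PACKAGE_INDEX.getD pkg "misc") [] fun b => b ++ [pkg])
          PySem.Dict.empty (PySem.List.sorted (PySem.Set.ofList u) fun x => x)).getD g.1 []
        = PySem.List.sorted (List.filter (fun x => g.2.contains x) (PySem.Set.ofList u)) (fun x => x) := by
    intro g hg
    rw [pvBuckets_getD, pvSortedFilter]
    apply List.filter_congr
    intro x _
    cases hc : g.2.contains x
    · exact beq_eq_false_iff_ne.mpr
        (fun h => absurd ((pvClassify_mem g hg x).mp h) (by simpa using hc))
    · exact beq_iff_eq.mpr ((pvClassify_mem g hg x).mpr (by simpa using hc))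
  have hOut : ∀ g ∈ PACKAGE_GROUPS,
      (if (List.foldl (fun bk pkg => bk.modify (PACKAGE_INDEX.getD pkg "misc") [] fun b => b ++ [pkg])
            PySem.Dict.empty (PySem.List.sorted (PySem.Set.ofList u) fun x => x)).contains g.1
       then some ((fun x => (x,
            (List.foldl (fun bk pkg => bk.modify (PACKAGE_INDEX.getD pkg "misc") [] fun b => b ++ [pkg])
              PySem.Dict.empty (PySem.List.sorted (PySem.Set.ofList u) fun x => x)).getD x [])) g.1)
       else none)
      = (fun g => if List.filter (fun x => g.2.contains x) (PySem.Set.ofList u) = [] then none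
          else some (g.1, PySem.List.sorted (List.filter (fun x => g.2.contains x) (PySem.Set.ofList u)) fun x => x)) g := by
    intro g hg
    beta_reduce
    by_cases hO : List.filter (fun x => g.2.contains x) (PySem.Set.ofList u) = []
    · have hcf : ¬((List.foldl (fun bk pkg => bk.modify (PACKAGE_INDEX.getD pkg "misc") [] fun b => b ++ [pkg])
            PySem.Dict.empty (PySem.List.sorted (PySem.Set.ofList u) fun x => x)).contains g.1 = true) := by
        rw [pvBuckets_contains]
        rintro ⟨p, hpd, hpc⟩
        have hpg : p ∈ g.2 := (pvClassify_mem g hg p).mp hpc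
        have hps : p ∈ PySem.Set.ofList u := (hmem p).mp hpd
        have := List.filter_eq_nil_iff.mp hO p hps
        simp [hpg] at this
      rw [if_neg hcf, if_pos hO]
    · obtain ⟨p, hpf⟩ := List.exists_mem_of_ne_nil _ hO
      have hps : p ∈ PySem.Set.ofList u := (List.mem_filter.mp hpf).1
      have hpg : g.2.contains p = true := (List.mem_filter.mp hpf).2
      have hct : (List.foldl (fun bk pkg => bk.modify (PACKAGE_INDEX.getD pkg "misc") [] fun b => b ++ [pkg])
            PySem.Dict.empty (PySem.List.sorted (PySem.Set.ofList u) fun x => x)).contains g.1 = true := by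
        rw [pvBuckets_contains]
        exact ⟨p, (hmem p).mpr hps, (pvClassify_mem g hg p).mpr (by simpa using hpg)⟩
      rw [if_pos hct, if_neg hO]
      simp [hgetD g hg]
  rw [pvOut _ _ _ PACKAGE_GROUPS hOut]
  have hmiscval :
      (List.foldl (fun bk pkg => bk.modify (PACKAGE_INDEX.getD pkg "misc") [] fun b => b ++ [pkg])
          PySem.Dict.empty (PySem.List.sorted (PySem.Set.ofList u) fun x => x)).getD "misc" []
        = PySem.List.sorted (List.filter (fun x => !PACKAGE_GROUPS.any fun g => g.2.contains x) (PySem.Set.ofList u)) (fun x => x) := by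
    rw [pvBuckets_getD, pvSortedFilter]
    apply List.filter_congr
    intro x _
    cases ha : PACKAGE_GROUPS.any fun g => g.2.contains x
    · have hall : ∀ g ∈ PACKAGE_GROUPS, x ∉ g.2 := by
        intro g hg hx
        have := List.any_eq_false.mp ha g hg
        simp [hx] at this
      simp [(pvClassify_misc x).mpr hall]
    · obtain ⟨g, hg, hgx⟩ := List.any_eq_true.mp ha
      have : (pvClassify x == "misc") = false :=
        beq_eq_false_iff_ne.mpr
          (fun h => absurd ((pvClassify_misc x).mp h g hg) (by simpa using hgx))
      simp [this]
  by_cases hrem : List.filter (fun x => !PACKAGE_GROUPS.any fun g => g.2.contains x) (PySem.Set.ofList u) = []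
  · have hcf : ¬((List.foldl (fun bk pkg => bk.modify (PACKAGE_INDEX.getD pkg "misc") [] fun b => b ++ [pkg])
          PySem.Dict.empty (PySem.List.sorted (PySem.Set.ofList u) fun x => x)).contains "misc" = true) := by
      rw [pvBuckets_contains]
      rintro ⟨p, hpd, hpc⟩
      have hall := (pvClassify_misc p).mp hpc
      have hps : p ∈ PySem.Set.ofList u := (hmem p).mp hpd
      have := List.filter_eq_nil_iff.mp hrem p hps
      have hanyf : (PACKAGE_GROUPS.any fun g => g.2.contains p) = false := by
        apply List.any_eq_false.mpr
        intro g hg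
        simp [hall g hg]
      exact this (by rw [hanyf]; rfl)
    rw [if_pos hrem, List.filter_cons_of_neg (by simpa using hcf), List.filter_nil, List.map_nil,
      List.append_nil]
  · obtain ⟨p, hpf⟩ := List.exists_mem_of_ne_nil _ hrem
    have hps : p ∈ PySem.Set.ofList u := (List.mem_filter.mp hpf).1
    have hpm : ∀ g ∈ PACKAGE_GROUPS, p ∉ g.2 := by
      intro g hg hx
      have := (List.mem_filter.mp hpf).2
      simp only [Bool.not_eq_true', List.any_eq_false] at this
      exact absurd (by simpa using hx : g.2.contains p = true) (by simpa using this g hg)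
    have hct : (List.foldl (fun bk pkg => bk.modify (PACKAGE_INDEX.getD pkg "misc") [] fun b => b ++ [pkg])
          PySem.Dict.empty (PySem.List.sorted (PySem.Set.ofList u) fun x => x)).contains "misc" = true := by
      rw [pvBuckets_contains]
      exact ⟨p, (hmem p).mpr hps, (pvClassify_misc p).mpr hpm⟩
    rw [if_neg hrem, List.filter_cons_of_pos hct, List.filter_nil, List.map_cons, List.map_nil,
      hmiscval]
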